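-- pv_equiv track=rewrite | github.com/ericmerle3789/Collatz-Junction-Theorem | scripts/exploration/sp10_level13_pieces.py | compute_additive_energy
-- ===== SOURCE A (Python) =====
-- from collections import Counter
--
-- def compute_additive_energy(p, m, elements):
--     """E(H) = |{(a,b,c,d) ∈ H⁴ : a+b ≡ c+d (mod p)}|."""
--     sums = Counter()
--     for a in elements:
--         for b in elements:
--             s = (a + b) % p
--             sums[s] += 1
--     E = sum(v * v for v in sums.values())
--     return E
-- ===== SOURCE B (Python) =====
-- def compute_additive_energy(p, m, elements):
--     """E(H) = |{(a,b,c,d) in H^4 : a+b = c+d (mod p)}|: sort the n^2 pairwise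
--     sums mod p, then sum the squared lengths of the runs of equal values
--     (no Counter/dict at all)."""
--     pair_sums = sorted((a + b) % p for a in elements for b in elements)
--     E = 0
--     i = 0
--     n = len(pair_sums)
--     while i < n:
--         j = i + 1
--         while j < n and pair_sums[j] == pair_sums[i]:
--             j += 1
--         E += (j - i) * (j - i)
--         i = j
--     return E
-- ===== Notes on version B (the rewrite author's own statement) =====
-- stated objective: alternative
-- what changed: B drops the Counter entirely: it sorts the n^2 pairwise sums mod p and sums the squared lengths of runs of equal values in one linear scan.
import Mathlib
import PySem

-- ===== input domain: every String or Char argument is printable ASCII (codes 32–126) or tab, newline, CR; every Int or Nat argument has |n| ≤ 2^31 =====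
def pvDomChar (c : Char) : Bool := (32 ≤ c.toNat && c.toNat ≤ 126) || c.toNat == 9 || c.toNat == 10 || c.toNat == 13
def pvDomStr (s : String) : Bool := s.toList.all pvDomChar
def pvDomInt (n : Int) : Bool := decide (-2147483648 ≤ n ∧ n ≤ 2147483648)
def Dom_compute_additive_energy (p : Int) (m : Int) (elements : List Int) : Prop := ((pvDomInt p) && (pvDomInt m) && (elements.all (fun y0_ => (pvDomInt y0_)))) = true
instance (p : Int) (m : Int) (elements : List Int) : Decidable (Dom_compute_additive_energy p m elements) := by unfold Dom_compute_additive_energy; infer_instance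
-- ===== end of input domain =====

-- B drops A's Counter entirely: it sorts the pairwise sums mod p and sums squared run lengths
-- in one scan; return value is unchanged (objective: an alternative algorithm, not speed).

-- ===== PORT A =====
def compute_additive_energy (p : Int) (m : Int) (elements : List Int) : Int :=
  let sums : PySem.Dict Int Int :=
    elements.foldl (fun d a =>
      elements.foldl (fun d b => d.modify (PySem.Int.mod (a + b) p) 0 (· + 1)) d)
      PySem.Dict.empty
  ((sums.values).map (fun v => v * v)).sum

-- ===== PORT B =====
-- B's run scan (the while loop over `pair_sums`) ported as structural recursion on runs:
-- the inner while over equal neighbours is takeWhile/dropWhile; exact on every list.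
def pvRunSq (l : List Int) : Int :=
  match l with
  | [] => 0
  | x :: xs =>
    let k : Int := ((xs.takeWhile (fun y => y == x)).length : Int) + 1
    k * k + pvRunSq (xs.dropWhile (fun y => y == x))
termination_by l.length
decreasing_by
  simp only [List.length_cons]
  exact Nat.lt_succ_of_le (List.length_dropWhile_le _ _)

def compute_additive_energy_alt (p : Int) (m : Int) (elements : List Int) : Int :=
  let pairSums :=
    PySem.List.sorted
      (elements.flatMap (fun a => elements.map (fun b => PySem.Int.mod (a + b) p)))
      (fun x => x) false
  pvRunSq pairSums

-- ===== PRECONDITION & SPEC =====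
-- Pre_ excludes only p = 0 with a nonempty list, where Python's '%' raises ZeroDivisionError
-- in both A and B; everything else is admitted.
def Pre_compute_additive_energy (p : Int) (m : Int) (elements : List Int) : Prop :=
  p ≠ 0 ∨ elements = []
instance (p : Int) (m : Int) (elements : List Int) : Decidable (Pre_compute_additive_energy p m elements) := by unfold Pre_compute_additive_energy; infer_instance
def pvWitness_compute_additive_energy : Int × Int × List Int := (5, 0, [1, 2, 3])
def Spec_compute_additive_energy (p : Int) (m : Int) (elements : List Int) (out : Int) : Prop := out = compute_additive_energy_alt p m elements
instance (p : Int) (m : Int) (elements : List Int) (out : Int) : Decidable (Spec_compute_additive_energy p m elements out) := by unfold Spec_compute_additive_energy; infer_instance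

-- ===== CLAIM (what is proved, stated in full; the proofs are below) =====
def Claim_equal_compute_additive_energy : Prop := ∀ (p : Int) (m : Int) (elements : List Int), Dom_compute_additive_energy p m elements → Pre_compute_additive_energy p m elements → Spec_compute_additive_energy p m elements (compute_additive_energy p m elements)

-- ===== LEMMAS AND PROOFS =====
def laList (p : Int) (els : List Int) : List Int :=
  els.flatMap (fun a => els.map (fun b => PySem.Int.mod (a + b) p))

-- A's dict is the counter of laList
lemma sumsA_eq (p : Int) (els : List Int) :
    els.foldl (fun d a =>
      els.foldl (fun d b => d.modify (PySem.Int.mod (a + b) p) 0 (· + 1)) d)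
      (PySem.Dict.empty : PySem.Dict Int Int)
      = PySem.Dict.counter (laList p els) := by
  rw [PySem.Dict.counter_eq_foldl (κ := Int), laList, List.foldl_flatMap]
  simp [List.foldl_map]

lemma A_eq_sum (p m : Int) (els : List Int) :
    compute_additive_energy p m els
      = ∑ s ∈ (laList p els).toFinset,
          ((laList p els).count s : Int) * ((laList p els).count s : Int) := by
  unfold compute_additive_energy
  rw [sumsA_eq]
  simp only [PySem.Dict.values, PySem.Dict.items_counter, List.map_map]
  rw [← List.sum_toFinset _ (PySem.Set.nodup_ofList (laList p els))]
  have hfe : (PySem.Set.ofList (laList p els)).toFinset = (laList p els).toFinset := by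
    apply Finset.ext; intro a
    simp [List.mem_toFinset, PySem.Set.mem_ofList]
  rw [hfe]
  simp

-- in a sorted list x :: xs, the tail past the leading x-run contains no x
lemma dropWhile_ne (x : Int) (xs : List Int)
    (hps : xs.Pairwise (· ≤ ·)) (hlb : ∀ y ∈ xs, x ≤ y) :
    ∀ y ∈ xs.dropWhile (fun y => y == x), y ≠ x := by
  induction xs with
  | nil => simp
  | cons z zs ih =>
    by_cases hz : z = x
    · subst hz
      rw [List.dropWhile_cons_of_pos (by simp)]
      exact ih hps.of_cons (fun y hy => hlb y (List.mem_cons_of_mem _ hy))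
    · rw [List.dropWhile_cons_of_neg (by simp [hz])]
      intro y hy
      rcases List.mem_cons.mp hy with h | h
      · subst h; exact hz
      · have hxz : x < z := lt_of_le_of_ne (hlb z (List.mem_cons_self)) (Ne.symm hz)
        have hzy : z ≤ y := (List.pairwise_cons.mp hps).1 y h
        exact ne_of_gt (lt_of_lt_of_le hxz hzy)

lemma count_takeWhile_eq (x : Int) (xs : List Int) :
    (xs.takeWhile (fun y => y == x)).count x = (xs.takeWhile (fun y => y == x)).length := by
  rw [List.count_eq_length]
  intro y hy
  have := List.mem_takeWhile_imp hy
  simp at this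
  simp [this]

lemma count_takeWhile_ne (x s : Int) (hs : s ≠ x) (xs : List Int) :
    (xs.takeWhile (fun y => y == x)).count s = 0 := by
  rw [List.count_eq_zero]
  intro hmem
  have := List.mem_takeWhile_imp hmem
  simp at this
  exact hs this

-- main B characterisation: run-length squares of a sorted list = sum of squared counts
lemma runSq_eq_sum (l : List Int) (hs : l.Pairwise (· ≤ ·)) :
    pvRunSq l = ∑ s ∈ l.toFinset, ((l.count s : Int) * (l.count s : Int)) := by
  induction l using pvRunSq.induct with
  | case1 => simp [pvRunSq]
  | case2 x xs ih =>
    have hlb : ∀ y ∈ xs, x ≤ y := (List.pairwise_cons.mp hs).1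
    have hps : xs.Pairwise (· ≤ ·) := hs.of_cons
    set t := xs.takeWhile (fun y => y == x) with ht
    set d := xs.dropWhile (fun y => y == x) with hd
    have hxs : xs = t ++ d := (List.takeWhile_append_dropWhile).symm
    have hdne : ∀ y ∈ d, y ≠ x := dropWhile_ne x xs hps hlb
    have hdp : d.Pairwise (· ≤ ·) := List.Pairwise.sublist (List.dropWhile_sublist _) hps
    have hxd : x ∉ d := fun h => hdne x h rfl
    have htx : ∀ y ∈ t, y = x := by
      intro y hy
      have := List.mem_takeWhile_imp hy
      simpa using this
    -- toFinset of x :: xs is insert x d.toFinset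
    have hfin : (x :: xs).toFinset = insert x d.toFinset := by
      apply Finset.ext; intro a
      simp only [List.toFinset_cons, Finset.mem_insert, List.mem_toFinset, hxs,
        List.mem_append]
      constructor
      · rintro (h | h | h)
        · exact Or.inl h
        · exact Or.inl (htx a h)
        · exact Or.inr h
      · rintro (h | h)
        · exact Or.inl h
        · exact Or.inr (Or.inr h)
    rw [pvRunSq, hfin, Finset.sum_insert (by simpa using hxd)]
    have hcx : ((x :: xs).count x : Int) = (t.length : Int) + 1 := by
      rw [List.count_cons_self, hxs, List.count_append, count_takeWhile_eq,
        List.count_eq_zero.mpr hxd]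
      push_cast; ring
    have hcs : ∀ s ∈ d.toFinset, (x :: xs).count s = d.count s := by
      intro s hsd
      have hsx : s ≠ x := hdne s (List.mem_toFinset.mp hsd)
      rw [hxs]
      simp [List.count_append, Ne.symm hsx]
      rw [ht]
      exact count_takeWhile_ne x s hsx xs
    rw [Finset.sum_congr rfl (fun s hsd => by rw [hcs s hsd])]
    rw [ih hdp, hcx]

-- ===== VERDICT (by name: the statement is the Claim_ definition above) =====
theorem compute_additive_energy_spec : Claim_equal_compute_additive_energy := by
  intro p m els _hdom _hpre
  unfold Spec_compute_additive_energy compute_additive_energy_alt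
  have hperm : (PySem.List.sorted (laList p els) (fun x => x) false).Perm (laList p els) :=
    PySem.List.sorted_perm _ _ _
  have hsorted : (PySem.List.sorted (laList p els) (fun x => x) false).Pairwise (· ≤ ·) := by
    simpa using PySem.List.sorted_pairwise (xs := laList p els) (key := fun x => x)
  rw [A_eq_sum]
  show _ = pvRunSq (PySem.List.sorted (laList p els) (fun x => x) false)
  rw [runSq_eq_sum _ hsorted]
  refine Finset.sum_congr ?_ (fun s _ => by rw [hperm.count_eq])
  apply Finset.ext; intro a
  simp [List.mem_toFinset, hperm.mem_iff]
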